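-- pv_equiv track=rewrite | github.com/Majumder99/competitve_programming_problems | job/enosis/round 1/array_problem.py | count_valid_triplets
-- ===== SOURCE A (Python) =====
-- def count_valid_triplets(d, t):
--     d.sort()  # Sort the array for easier searching
--     n = len(d)
--     counter = 0
--
--     # Iterate through each element as the first element of the triplet
--     for i in range(n - 2):
--         left, right = i + 1, n - 1  # Two-pointer approach
--
--         while left < right:
--             triplet_sum = d[i] + d[left] + d[right]
--
--             if triplet_sum <= t:
--                 # If valid, all elements from left to right form valid triplets
--                 # properties of a sorted array and the two-pointer technique
--                 counter += (right - left)
--                 left += 1  # Move left pointer to explore more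
--
--             else:
--                 right -= 1  # Reduce sum by moving right pointer
--
--     return counter
-- ===== SOURCE B (Python) =====
-- def count_valid_triplets(d, t):
--     d.sort()  # keep A's in-place sort of the argument
--     n = len(d)
--     counter = 0
--     for i in range(n):
--         for j in range(i + 1, n):
--             for k in range(j + 1, n):
--                 if d[i] + d[j] + d[k] <= t:
--                     counter += 1
--     return counter
-- ===== Notes on version B (the rewrite author's own statement) =====
-- stated objective: simpler
-- what changed: Replaces A's two-pointer convergence over the sorted array with plain exhaustive enumeration of all index triples i<j<k, counting those with sum <= t; B keeps A's in-place d.sort().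
import Mathlib
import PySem

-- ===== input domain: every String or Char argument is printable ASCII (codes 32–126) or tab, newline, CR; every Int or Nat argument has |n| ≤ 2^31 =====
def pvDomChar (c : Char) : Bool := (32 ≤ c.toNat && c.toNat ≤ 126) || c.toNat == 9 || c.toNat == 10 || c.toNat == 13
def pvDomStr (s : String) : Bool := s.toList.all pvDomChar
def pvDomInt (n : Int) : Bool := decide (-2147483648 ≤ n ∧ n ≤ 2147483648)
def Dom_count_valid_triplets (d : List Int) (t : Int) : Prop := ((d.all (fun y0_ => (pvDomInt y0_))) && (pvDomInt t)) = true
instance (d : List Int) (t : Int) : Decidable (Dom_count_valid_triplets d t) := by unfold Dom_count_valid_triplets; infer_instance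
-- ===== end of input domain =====

-- B replaces A's two-pointer convergence with plain exhaustive enumeration of all
-- index triples i<j<k (objective: simpler). Both sort the list first; A mutates its
-- argument in place via d.sort() and B does the same in Python — the equivalence
-- proved here is about the RETURN value.

-- ===== PORT A =====
-- the 'while left < right' loop of A; indices are Nat, access is getD (always in range)
def cvtWhile (s : List Int) (t : Int) (i l r : Nat) (c : Int) : Int :=
  if l < r then
    if s.getD i 0 + s.getD l 0 + s.getD r 0 ≤ t then
      cvtWhile s t i (l + 1) r (c + ((r : Int) - (l : Int)))
    else
      cvtWhile s t i l (r - 1) c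
  else c
termination_by r - l
decreasing_by all_goals omega

def count_valid_triplets (d : List Int) (t : Int) : Int :=
  let s := PySem.List.sorted d (fun x => x) false
  let n := s.length
  (List.range (n - 2)).foldl (fun c i => cvtWhile s t i (i + 1) (n - 1) c) 0

-- ===== PORT B =====
def count_valid_triplets_alt (d : List Int) (t : Int) : Int :=
  let s := PySem.List.sorted d (fun x => x) false
  let n := s.length
  (List.range n).foldl (fun c i =>
    (List.range' (i + 1) (n - (i + 1))).foldl (fun c j =>
      (List.range' (j + 1) (n - (j + 1))).foldl (fun c k =>
        if s.getD i 0 + s.getD j 0 + s.getD k 0 ≤ t then c + 1 else c) c) c) 0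

-- ===== PRECONDITION & SPEC =====
def Spec_count_valid_triplets (d : List Int) (t : Int) (out : Int) : Prop := out = count_valid_triplets_alt d t
instance (d : List Int) (t : Int) (out : Int) : Decidable (Spec_count_valid_triplets d t out) := by unfold Spec_count_valid_triplets; infer_instance

-- ===== CLAIM (what is proved, stated in full; the proofs are below) =====
def Claim_equal_count_valid_triplets : Prop := ∀ (d : List Int) (t : Int), Dom_count_valid_triplets d t → Spec_count_valid_triplets d t (count_valid_triplets d t)

-- ===== LEMMAS AND PROOFS =====

-- number of valid pairs l ≤ j < k ≤ r with s[i]+s[j]+s[k] ≤ t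
def pairCnt (s : List Int) (t : Int) (i : Nat) (l r : Nat) : Int :=
  ((List.range' l (r + 1 - l)).map (fun j =>
    (((List.range' (j + 1) (r - j)).filter
        (fun k => decide (s.getD i 0 + s.getD j 0 + s.getD k 0 ≤ t))).length : Int))).sum

theorem pairCnt_zero (s : List Int) (t : Int) (i l r : Nat) (h : r ≤ l) :
    pairCnt s t i l r = 0 := by
  unfold pairCnt
  rcases Nat.lt_or_ge r l with h' | h'
  · have : r + 1 - l = 0 := by omega
    simp [this]
  · have hrl : r = l := by omega
    subst hrl
    have h1 : r + 1 - r = 1 := by omega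
    have h2 : r - r = 0 := by omega
    simp [h1]

theorem cvtWhile_eq (s : List Int) (t : Int) (i : Nat)
    (hs : ∀ p q : Nat, p ≤ q → q < s.length → s.getD p 0 ≤ s.getD q 0) :
    ∀ l r c, r < s.length → cvtWhile s t i l r c = c + pairCnt s t i l r := by
  intro l r c hr
  induction l, r, c using cvtWhile.induct s t i with
  | case1 l r c hlr hcond ih =>
    have hkey : pairCnt s t i l r = ((r : Int) - (l : Int)) + pairCnt s t i (l + 1) r := by
      have hsplit : List.range' l (r + 1 - l) = l :: List.range' (l + 1) (r - l) := by
        have h1 : r + 1 - l = (r - l) + 1 := by omega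
        rw [h1, List.range'_succ]
      have hall : (List.range' (l + 1) (r - l)).filter
          (fun k => decide (s.getD i 0 + s.getD l 0 + s.getD k 0 ≤ t))
          = List.range' (l + 1) (r - l) := by
        apply List.filter_eq_self.2
        intro k hk
        have hk' := List.mem_range'_1.1 hk
        have hsk : s.getD k 0 ≤ s.getD r 0 := hs k r (by omega) hr
        simp only [decide_eq_true_eq]
        omega
      unfold pairCnt
      rw [hsplit]
      have h2 : r + 1 - (l + 1) = r - l := by omega
      rw [h2, List.map_cons, List.sum_cons, hall, List.length_range']
      have h3 : ((r - l : Nat) : Int) = (r : Int) - (l : Int) := by omega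
      rw [h3]
    rw [cvtWhile]
    simp only [hlr, if_true, hcond, if_true]
    rw [ih hr, hkey]
    ring
  | case2 l r c hlr hcond ih =>
    have hr' : r - 1 < s.length := by omega
    have hkey : pairCnt s t i l r = pairCnt s t i l (r - 1) := by
      have hsplit : List.range' l (r + 1 - l) = List.range' l (r - l) ++ [r] := by
        have h1 : r + 1 - l = (r - l) + 1 := by omega
        rw [h1, List.range'_1_concat]
        have h2 : l + (r - l) = r := by omega
        rw [h2]
      unfold pairCnt
      rw [hsplit, List.map_append, List.sum_append]
      have h4 : (([r].map (fun j =>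
          (((List.range' (j + 1) (r - j)).filter
              (fun k => decide (s.getD i 0 + s.getD j 0 + s.getD k 0 ≤ t))).length : Int))).sum) = 0 := by
        simp
      rw [h4, add_zero]
      have h3 : r - 1 + 1 - l = r - l := by omega
      rw [h3]
      congr 1
      apply List.map_congr_left
      intro j hj
      have hj' := List.mem_range'_1.1 hj
      have hsplit2 : List.range' (j + 1) (r - j) = List.range' (j + 1) (r - 1 - j) ++ [r] := by
        have h1 : r - j = (r - 1 - j) + 1 := by omega
        rw [h1, List.range'_1_concat]
        have h2 : j + 1 + (r - 1 - j) = r := by omega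
        rw [h2]
      have hjl : s.getD l 0 ≤ s.getD j 0 := hs l j (by omega) (by omega)
      have hbad : ¬ (s.getD i 0 + s.getD j 0 + s.getD r 0 ≤ t) := by omega
      have hdec : decide (s.getD i 0 + s.getD j 0 + s.getD r 0 ≤ t) = false := by
        simpa using hbad
      rw [hsplit2, List.filter_append, List.filter_singleton, hdec]
      simp
    rw [cvtWhile]
    simp only [hlr, if_true, hcond, if_false]
    rw [ih hr', hkey]
  | case3 l r c hlr =>
    rw [cvtWhile]
    simp only [hlr, if_false]
    rw [pairCnt_zero s t i l r (by omega)]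
    omega

-- the innermost counting loop of B is a filter length
theorem foldl_count_ite (p : Nat → Prop) [DecidablePred p] :
    ∀ (l : List Nat) (c : Int),
      l.foldl (fun c k => if p k then c + 1 else c) c
        = c + ((l.filter (fun k => decide (p k))).length : Int) := by
  intro l
  induction l with
  | nil => intro c; simp
  | cons x xs ih =>
    intro c
    rw [List.foldl_cons]
    by_cases hx : p x
    · simp only [hx, if_true]
      rw [ih]
      simp [hx]
      omega
    · simp only [hx, if_false]
      rw [ih]
      simp [hx]

-- pointwise-equal step functions fold alike
theorem foldl_congr' {α β : Type} (l : List α) (f g : β → α → β) (c : β)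
    (h : ∀ b : β, ∀ a ∈ l, f b a = g b a) : l.foldl f c = l.foldl g c := by
  induction l generalizing c with
  | nil => rfl
  | cons x xs ih =>
    rw [List.foldl_cons, List.foldl_cons, h c x (by simp)]
    exact ih _ (fun b a ha => h b a (by simp [ha]))

-- folds that add a per-element contribution
theorem foldl_addf (g : Nat → Int) :
    ∀ (l : List Nat) (c : Int),
      l.foldl (fun c j => c + g j) c = c + (l.map g).sum := by
  intro l
  induction l with
  | nil => intro c; simp
  | cons x xs ih =>
    intro c
    simp only [List.foldl_cons, List.map_cons, List.sum_cons, ih]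
    ring

-- B's contribution for one fixed i equals pairCnt
theorem alt_inner_eq (s : List Int) (t : Int) (n : Nat) (hn : n = s.length) (i : Nat) (c : Int) :
    (List.range' (i + 1) (n - (i + 1))).foldl (fun c j =>
      (List.range' (j + 1) (n - (j + 1))).foldl (fun c k =>
        if s.getD i 0 + s.getD j 0 + s.getD k 0 ≤ t then c + 1 else c) c) c
    = c + pairCnt s t i (i + 1) (n - 1) := by
  have hstep : ∀ (cj : Int) (j : Nat),
      (List.range' (j + 1) (n - (j + 1))).foldl (fun c k =>
        if s.getD i 0 + s.getD j 0 + s.getD k 0 ≤ t then c + 1 else c) cj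
      = cj + (((List.range' (j + 1) (n - 1 - j)).filter
          (fun k => decide (s.getD i 0 + s.getD j 0 + s.getD k 0 ≤ t))).length : Int) := by
    intro cj j
    have h1 : n - (j + 1) = n - 1 - j := by omega
    rw [h1]
    exact foldl_count_ite (fun k => s.getD i 0 + s.getD j 0 + s.getD k 0 ≤ t) _ cj
  calc (List.range' (i + 1) (n - (i + 1))).foldl (fun c j =>
      (List.range' (j + 1) (n - (j + 1))).foldl (fun c k =>
        if s.getD i 0 + s.getD j 0 + s.getD k 0 ≤ t then c + 1 else c) c) c
      = (List.range' (i + 1) (n - (i + 1))).foldl (fun c j =>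
          c + (((List.range' (j + 1) (n - 1 - j)).filter
            (fun k => decide (s.getD i 0 + s.getD j 0 + s.getD k 0 ≤ t))).length : Int)) c := by
        apply foldl_congr'
        intro cj j _
        exact hstep cj j
    _ = c + pairCnt s t i (i + 1) (n - 1) := by
        rw [foldl_addf]
        unfold pairCnt
        have : n - 1 + 1 - (i + 1) = n - (i + 1) := by omega
        rw [this]

-- sortedness of the Python-sorted list, in getD form
theorem sorted_getD_mono (d : List Int) :
    ∀ p q : Nat, p ≤ q → q < (PySem.List.sorted d (fun x => x) false).length →
      (PySem.List.sorted d (fun x => x) false).getD p 0 ≤ (PySem.List.sorted d (fun x => x) false).getD q 0 := by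
  intro p q hpq hq
  have hp : p < (PySem.List.sorted d (fun x => x) false).length := by omega
  rw [List.getD_eq_getElem _ _ hp, List.getD_eq_getElem _ _ hq]
  exact PySem.List.sorted_id_getElem_mono d hpq hq

-- ===== VERDICT (by name: the statement is the Claim_ definition above) =====
theorem count_valid_triplets_spec : Claim_equal_count_valid_triplets := by
  intro d t _
  unfold Spec_count_valid_triplets count_valid_triplets count_valid_triplets_alt
  set s := PySem.List.sorted d (fun x => x) false with hsdef
  set n := s.length with hn
  have hs := sorted_getD_mono d
  rw [← hsdef] at hs
  -- rewrite both folds as sums of pairCnt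
  have hA : (List.range (n - 2)).foldl (fun c i => cvtWhile s t i (i + 1) (n - 1) c) 0
      = ((List.range (n - 2)).map (fun i => pairCnt s t i (i + 1) (n - 1))).sum := by
    rcases Nat.eq_zero_or_pos n with h0 | hpos
    · simp [h0]
    · have hr : n - 1 < s.length := by omega
      have : ∀ (c : Int) (i : Nat), cvtWhile s t i (i + 1) (n - 1) c = c + pairCnt s t i (i + 1) (n - 1) := by
        intro c i; exact cvtWhile_eq s t i hs (i + 1) (n - 1) c hr
      calc (List.range (n - 2)).foldl (fun c i => cvtWhile s t i (i + 1) (n - 1) c) 0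
          = (List.range (n - 2)).foldl (fun c i => c + pairCnt s t i (i + 1) (n - 1)) 0 := by
            apply foldl_congr'
            intro c i _; exact this c i
        _ = ((List.range (n - 2)).map (fun i => pairCnt s t i (i + 1) (n - 1))).sum := by
            rw [foldl_addf]; ring
  have hB : (List.range n).foldl (fun c i =>
        (List.range' (i + 1) (n - (i + 1))).foldl (fun c j =>
          (List.range' (j + 1) (n - (j + 1))).foldl (fun c k =>
            if s.getD i 0 + s.getD j 0 + s.getD k 0 ≤ t then c + 1 else c) c) c) 0
      = ((List.range n).map (fun i => pairCnt s t i (i + 1) (n - 1))).sum := by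
    calc (List.range n).foldl (fun c i =>
          (List.range' (i + 1) (n - (i + 1))).foldl (fun c j =>
            (List.range' (j + 1) (n - (j + 1))).foldl (fun c k =>
              if s.getD i 0 + s.getD j 0 + s.getD k 0 ≤ t then c + 1 else c) c) c) 0
        = (List.range n).foldl (fun c i => c + pairCnt s t i (i + 1) (n - 1)) 0 := by
          apply foldl_congr'
          intro c i _; exact alt_inner_eq s t n hn i c
      _ = ((List.range n).map (fun i => pairCnt s t i (i + 1) (n - 1))).sum := by
          rw [foldl_addf]; ring
  rw [hA, hB]
  -- the last two i of range n contribute nothing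
  rcases Nat.lt_or_ge n 2 with hsm | hlg
  · interval_cases n
    · simp
    · have : pairCnt s t 0 1 0 = 0 := pairCnt_zero s t 0 1 0 (by omega)
      simp [List.range_succ, this]
  · have hsplit : List.range n = List.range (n - 2) ++ [n - 2, n - 1] := by
      have h1 : n = (n - 2) + 1 + 1 := by omega
      rw [h1, List.range_succ, List.range_succ]
      have e1 : n - 2 + 1 + 1 - 2 = n - 2 := by omega
      have e2 : n - 2 + 1 + 1 - 1 = n - 1 := by omega
      rw [e1] at *
      simp [e2]
      omega
    rw [hsplit, List.map_append, List.sum_append]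
    have z1 : pairCnt s t (n - 2) (n - 2 + 1) (n - 1) = 0 :=
      pairCnt_zero s t _ _ _ (by omega)
    have z2 : pairCnt s t (n - 1) (n - 1 + 1) (n - 1) = 0 :=
      pairCnt_zero s t _ _ _ (by omega)
    simp [z1, z2]
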